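-- pv_equiv track=rewrite | github.com/nermadie/CodeForces_Solutions | CodeforcesRound1072Div3/prob03.py | solve
-- ===== SOURCE A (Python) =====
-- import math
--
-- def solve(n, k):
--     if n < k:
--         return -1
--     temp_set = {n}
--     count = 0
--     while True:
--         if k in temp_set:
--             return count
--         new_set = set()
--         for num in temp_set:
--             if num == 1:
--                 continue
--             new_set.add(math.ceil(num / 2))
--             new_set.add(math.floor(num / 2))
--         if len(new_set) == 0:
--             return -1
--         temp_set = new_set
--         count += 1
-- ===== SOURCE B (Python) =====
-- def solve(n, k):
--     # Interval view: the values reachable after t halvings form a width-<=1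
--     # integer interval, tracked directly as [lo, hi] instead of a BFS over sets.
--     if n < k:
--         return -1
--     lo = hi = n
--     t = 0
--     while True:
--         if lo <= k <= hi:
--             return t
--         if hi <= 1:
--             return -1
--         lo = max(lo // 2, 1)
--         hi = -(-hi // 2)
--         t += 1
-- ===== Notes on version B (the rewrite author's own statement) =====
-- stated objective: simpler
-- what changed: Replaces the BFS expansion of a set of reachable values by direct tracking of the width-<=1 integer interval [lo,hi] those values always form, updating two integers per step instead of rebuilding a set.
import Mathlib
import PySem

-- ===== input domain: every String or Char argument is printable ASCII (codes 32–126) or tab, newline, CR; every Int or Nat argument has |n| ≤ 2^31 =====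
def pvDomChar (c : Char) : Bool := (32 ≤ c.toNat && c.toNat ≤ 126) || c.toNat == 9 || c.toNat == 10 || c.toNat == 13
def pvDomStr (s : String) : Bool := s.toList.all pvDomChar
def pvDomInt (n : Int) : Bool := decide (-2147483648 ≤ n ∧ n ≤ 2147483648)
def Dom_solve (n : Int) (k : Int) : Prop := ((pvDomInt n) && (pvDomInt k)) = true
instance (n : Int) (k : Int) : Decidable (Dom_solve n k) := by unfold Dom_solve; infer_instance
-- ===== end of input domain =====

-- B replaces A's BFS over sets of reachable values by tracking the width-≤1 integer
-- interval [lo, hi] those values always form: two integers per step instead of a set.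

-- ===== PORT A =====
-- math.floor(num / 2): exact, since |num| ≤ 2^31 ≪ 2^53 keeps the float division exact
def pyHalfFloor (num : Int) : Int := PySem.Int.floordiv num 2
-- math.ceil(num / 2)
def pyHalfCeil (num : Int) : Int := -(PySem.Int.floordiv (-num) 2)

-- A's 'while True' loop; fuel only makes it total (A diverges on n ≤ 0 ∧ k < n, excluded
-- by Pre_solve; inside Dom ∧ Pre_ the loop resolves well within 64 iterations, proved below).
-- Iterating the set in its list order is sound: the body only builds another set, tests
-- membership and takes len, none of which depend on Python's hash order.
def solveLoop (k : Int) : Nat → PySem.Set Int → Int → Int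
  | 0, _, _ => -1
  | fuel+1, temp, count =>
    if PySem.Set.contains temp k then count
    else
      let new := temp.foldl
        (fun s num => if num = 1 then s
          else PySem.Set.add (PySem.Set.add s (pyHalfCeil num)) (pyHalfFloor num))
        PySem.Set.empty
      if new.length = 0 then (-1 : Int)
      else solveLoop k fuel new (count + 1)

def solve (n : Int) (k : Int) : Int :=
  if n < k then -1
  else solveLoop k 64 (PySem.Set.ofList [n]) 0

-- ===== PORT B =====
def altLoop (k lo hi t : Int) : Int :=
  if lo ≤ k ∧ k ≤ hi then t
  else if hi ≤ 1 then -1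
  else altLoop k (max (PySem.Int.floordiv lo 2) 1) (-(PySem.Int.floordiv (-hi) 2)) (t + 1)
  termination_by hi.toNat
  decreasing_by
    rename_i h2
    have : PySem.Int.floordiv (-hi) 2 = (-hi) / 2 :=
      PySem.Int.floordiv_eq_ediv_of_pos (by omega)
    rw [this]; omega

def solve_alt (n : Int) (k : Int) : Int :=
  if n < k then -1 else altLoop k n n 0

-- ===== PRECONDITION & SPEC =====
-- Pre_ excludes exactly the inputs with n ≤ 0 and k < n, on which A's while-loop never
-- terminates (the reachable values stay ≥ n and never hit k, and never empty out).
def Pre_solve (n : Int) (k : Int) : Prop := 1 ≤ n ∨ n ≤ k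
instance (n : Int) (k : Int) : Decidable (Pre_solve n k) := by unfold Pre_solve; infer_instance
def pvWitness_solve : Int × Int := (10, 3)

def Spec_solve (n : Int) (k : Int) (out : Int) : Prop := out = solve_alt n k
instance (n : Int) (k : Int) (out : Int) : Decidable (Spec_solve n k out) := by unfold Spec_solve; infer_instance

-- ===== CLAIM (what is proved, stated in full; the proofs are below) =====
def Claim_equal_solve : Prop := ∀ (n : Int) (k : Int), Dom_solve n k → Pre_solve n k → Spec_solve n k (solve n k)

-- ===== LEMMAS AND PROOFS =====

-- the {1} state: both sides return count if k = 1, else -1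
theorem loop_one (f : Nat) (count k : Int) :
    solveLoop k (f + 1) [1] count = altLoop k 1 1 count := by
  rw [altLoop, solveLoop]
  by_cases hk : k = 1
  · subst hk
    simp [PySem.Set.contains]
  · have h1 : PySem.Set.contains [(1:Int)] k = false := by
      simp [PySem.Set.contains]; omega
    simp [h1, hk]
    omega

theorem solve_loop_eq : ∀ (f : Nat) (lo hi count k : Int),
    1 ≤ lo → lo ≤ hi → hi ≤ lo + 1 → hi ≤ 2 ^ f →
    solveLoop k (f + 1) (if lo = hi then [hi] else [hi, lo]) count = altLoop k lo hi count := by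
  intro f
  induction f with
  | zero =>
    intro lo hi count k h1 h2 h3 h4
    have : lo = 1 ∧ hi = 1 := by norm_num at h4; omega
    obtain ⟨rfl, rfl⟩ : lo = 1 ∧ hi = 1 := this
    simpa using loop_one 0 count k
  | succ f ih =>
    intro lo hi count k h1 h2 h3 h4
    by_cases hhi : hi ≤ 1
    · have : lo = 1 ∧ hi = 1 := ⟨by omega, by omega⟩
      obtain ⟨rfl, rfl⟩ := this
      simpa using loop_one (f + 1) count k
    · -- hi ≥ 2
      push_neg at hhi
      have hfl : PySem.Int.floordiv lo 2 = lo / 2 := PySem.Int.floordiv_eq_ediv_of_pos (by omega)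
      have hfh : PySem.Int.floordiv hi 2 = hi / 2 := PySem.Int.floordiv_eq_ediv_of_pos (by omega)
      have hcl : PySem.Int.floordiv (-lo) 2 = (-lo) / 2 := PySem.Int.floordiv_eq_ediv_of_pos (by omega)
      have hch : PySem.Int.floordiv (-hi) 2 = (-hi) / 2 := PySem.Int.floordiv_eq_ediv_of_pos (by omega)
      set lo' : Int := max (PySem.Int.floordiv lo 2) 1 with hlo'
      set hi' : Int := -(PySem.Int.floordiv (-hi) 2) with hhi'
      have hb1 : 1 ≤ lo' := le_max_right _ _
      have hb2 : lo' ≤ hi' := by rw [hlo', hhi', hfl, hch]; omega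
      have hb3 : hi' ≤ lo' + 1 := by rw [hlo', hhi', hfl, hch]; omega
      have hb4 : hi' ≤ 2 ^ f := by
        have hp : (2:Int) ^ (f+1) = 2 * 2 ^ f := by ring
        rw [hhi', hch]; rw [hp] at h4
        have : (0:Int) < 2 ^ f := by positivity
        omega
      -- the new set computed by A's fold
      have hnew : (if lo = hi then [hi] else [hi, lo]).foldl
          (fun s num => if num = 1 then s
            else PySem.Set.add (PySem.Set.add s (pyHalfCeil num)) (pyHalfFloor num))
          PySem.Set.empty = (if lo' = hi' then [hi'] else [hi', lo']) := by
        have hne1 : hi ≠ 1 := by omega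
        have e1 : pyHalfFloor lo = lo / 2 := by simp [pyHalfFloor, hfl]
        have e2 : pyHalfCeil lo = -((-lo) / 2) := by simp [pyHalfCeil, hcl]
        have e3 : pyHalfFloor hi = hi / 2 := by simp [pyHalfFloor, hfh]
        have e4 : pyHalfCeil hi = -((-hi) / 2) := by simp [pyHalfCeil, hch]
        by_cases hlh : lo = hi
        · subst hlh
          simp only [eq_self_iff_true, ite_true, List.foldl]
          rw [if_neg hne1]
          simp only [PySem.Set.add_eq_ite, PySem.Set.empty]
          split_ifs <;>
            (try simp only [List.nil_append, List.singleton_append, List.cons_append,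
              List.mem_cons, List.not_mem_nil, List.mem_singleton, or_false, false_or,
              List.cons.injEq, and_true, true_and] at *) <;> omega
        · have hhe : hi = lo + 1 := by omega
          rw [if_neg hlh]
          by_cases hlo1 : lo = 1
          · subst hlo1
            have h2 : hi = 2 := by omega
            subst h2
            rw [hlo', hhi']
            decide
          · simp only [List.foldl_cons, List.foldl_nil, if_neg hne1, if_neg hlo1]
            simp only [PySem.Set.add_eq_ite, PySem.Set.empty]
            split_ifs <;>
              (try simp only [List.nil_append, List.singleton_append, List.cons_append,
                List.mem_cons, List.not_mem_nil, List.mem_singleton, or_false, false_or,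
                List.cons.injEq, and_true, true_and] at *) <;> omega
      -- membership
      by_cases hk : lo ≤ k ∧ k ≤ hi
      · have hc : PySem.Set.contains (if lo = hi then [hi] else [hi, lo]) k = true := by
          split <;> simp [PySem.Set.contains] <;> omega
        rw [altLoop, solveLoop, hc]
        simp [hk]
      · have hc : PySem.Set.contains (if lo = hi then [hi] else [hi, lo]) k = false := by
          split <;> simp [PySem.Set.contains] <;> omega
        rw [altLoop, solveLoop, hc]
        have hlen : ((if lo' = hi' then [hi'] else [hi', lo']) : List Int).length ≠ 0 := by
          split <;> simp
        simp only [Bool.false_eq_true, if_false, hnew, if_neg hk, if_neg (by omega : ¬ hi ≤ 1)]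
        rw [if_neg hlen]
        exact ih lo' hi' (count + 1) k hb1 hb2 hb3 hb4

theorem solve_main : ∀ (n k : Int), Dom_solve n k → Pre_solve n k → Spec_solve n k (solve n k) := by
  intro n k hdom hpre
  unfold Spec_solve
  unfold solve solve_alt
  by_cases hnk : n < k
  · rw [if_pos hnk, if_pos hnk]
  · rw [if_neg hnk, if_neg hnk]
    by_cases h1 : 1 ≤ n
    · have hb : n ≤ 2 ^ 63 := by
        simp only [Dom_solve, pvDomInt, Bool.and_eq_true, decide_eq_true_eq] at hdom
        have : (2:Int) ^ 63 = 9223372036854775808 := by norm_num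
        omega
      have hofl : PySem.Set.ofList [n] = [n] := by
        apply PySem.Set.ofList_eq_self_of_nodup; simp
      have h64 : (64 : Nat) = 63 + 1 := by norm_num
      have := solve_loop_eq 63 n n 0 k h1 le_rfl (by omega) hb
      rw [if_pos rfl] at this
      rw [hofl, h64]
      exact this
    · have hk : n = k := by
        rcases hpre with h | h
        · omega
        · omega
      subst hk
      have hc : PySem.Set.contains (PySem.Set.ofList [n]) n = true := by
        rw [PySem.Set.contains_iff, PySem.Set.mem_ofList]; simp
      rw [show (64:Nat) = 63+1 from rfl, solveLoop, altLoop]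
      rw [hc]
      simp


-- ===== VERDICT (by name: the statement is the Claim_ definition above) =====
theorem solve_spec : Claim_equal_solve := by
  unfold Claim_equal_solve
  exact solve_main
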